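-- pv_equiv track=rewrite | github.com/michaltomco/LeetCode | problems/0027-remove-element.py | remove_element_pointer_two_pointers
-- ===== SOURCE A (Python) =====
-- from typing import List, Callable
--
-- def remove_element_pointer_two_pointers(nums: List[int], val: int) -> int:
--     left = 0
--     for right in range(len(nums)):
--         if nums[right] != val:
--             nums[left] = nums[right]
--             left += 1
--     nums[:] = nums[:left]
--
--     return left
-- ===== SOURCE B (Python) =====
-- from typing import List
--
-- def remove_element_pointer_two_pointers(nums: List[int], val: int) -> int:
--     while val in nums:
--         nums.remove(val)
--     return len(nums)
-- ===== Notes on version B (the rewrite author's own statement) =====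
-- stated objective: alternative
-- what changed: Replaces the single-pass two-pointer compaction with a repeated search-and-delete loop (while val in nums: nums.remove(val)) returning the final length.
import Mathlib
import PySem

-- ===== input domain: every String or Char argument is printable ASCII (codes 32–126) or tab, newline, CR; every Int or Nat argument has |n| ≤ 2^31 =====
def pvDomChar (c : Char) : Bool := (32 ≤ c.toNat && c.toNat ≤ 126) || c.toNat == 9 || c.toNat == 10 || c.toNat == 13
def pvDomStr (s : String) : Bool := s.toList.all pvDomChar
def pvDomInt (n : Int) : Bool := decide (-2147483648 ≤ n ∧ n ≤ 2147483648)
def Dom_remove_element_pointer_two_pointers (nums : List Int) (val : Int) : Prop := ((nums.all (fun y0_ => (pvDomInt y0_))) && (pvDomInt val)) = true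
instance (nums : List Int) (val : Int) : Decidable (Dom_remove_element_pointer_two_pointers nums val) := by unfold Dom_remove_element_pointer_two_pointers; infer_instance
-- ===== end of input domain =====

-- B replaces the two-pointer compaction pass with a repeated first-occurrence search-and-delete loop
-- (alternative algorithm, not faster). Both Pythons mutate nums in place to the same final contents;
-- the equivalence proved here is about the RETURN value only.

-- ===== PORT A =====
-- loop body of 'for right in range(len(nums))' over the state (nums, left)
def pvStepA (val : Int) (st : List Int × Int) (right : Int) : List Int × Int :=
  if PySem.List.pyGetD st.1 right 0 ≠ val then
    (PySem.List.pySetD st.1 st.2 (PySem.List.pyGetD st.1 right 0), st.2 + 1)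
  else st

def remove_element_pointer_two_pointers (nums : List Int) (val : Int) : Int :=
  -- left = 0; for right in range(len(nums)): ...
  let r := (PySem.List.pyRange 0 (nums.length : Int) 1).foldl (pvStepA val) (nums, 0)
  -- 'nums[:] = nums[:left]' only mutates the argument; the return value is left
  r.2

-- ===== PORT B =====
-- 'while val in nums: nums.remove(val)'  (remove? is none exactly when val is not in the list)
def pvWhileRemove (lst : List Int) (val : Int) : List Int :=
  match h : PySem.List.remove? lst val with
  | some l' => pvWhileRemove l' val
  | none   => lst
termination_by lst.length
decreasing_by
  have hmem : val ∈ lst := by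
    by_contra hc
    rw [(PySem.List.remove?_eq_none_iff lst val).2 hc] at h
    simp at h
  rw [PySem.List.remove?_eq_some_erase (v := val) (xs := lst) hmem] at h
  cases h
  have := List.length_erase_of_mem hmem
  have hpos : 0 < lst.length := List.length_pos_of_mem hmem
  omega

def remove_element_pointer_two_pointers_alt (nums : List Int) (val : Int) : Int :=
  -- return len(nums)
  ((pvWhileRemove nums val).length : Int)

-- ===== PRECONDITION & SPEC =====
def Spec_remove_element_pointer_two_pointers (nums : List Int) (val : Int) (out : Int) : Prop := out = remove_element_pointer_two_pointers_alt nums val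
instance (nums : List Int) (val : Int) (out : Int) : Decidable (Spec_remove_element_pointer_two_pointers nums val out) := by unfold Spec_remove_element_pointer_two_pointers; infer_instance

-- ===== CLAIM (what is proved, stated in full; the proofs are below) =====
def Claim_equal_remove_element_pointer_two_pointers : Prop := ∀ (nums : List Int) (val : Int), Dom_remove_element_pointer_two_pointers nums val → Spec_remove_element_pointer_two_pointers nums val (remove_element_pointer_two_pointers nums val)

-- ===== LEMMAS AND PROOFS =====

-- erasing one occurrence of val does not change the val-free filtrate
theorem filter_erase_val (val : Int) : ∀ (lst : List Int),
    (lst.erase val).filter (fun x => x != val) = lst.filter (fun x => x != val) := by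
  intro lst
  induction lst with
  | nil => simp
  | cons x xs ih =>
    by_cases hx : x = val
    · subst hx; simp
    · simp [hx, ih]

-- B's loop removes exactly all occurrences of val
theorem whileRemove_eq_filter (val : Int) (lst : List Int) :
    pvWhileRemove lst val = lst.filter (fun x => x != val) := by
  induction lst using pvWhileRemove.induct (val := val) with
  | case1 lst l' h ih =>
    have hmem : val ∈ lst := by
      by_contra hc
      rw [(PySem.List.remove?_eq_none_iff lst val).2 hc] at h
      simp at h
    have he := PySem.List.remove?_eq_some_erase (v := val) (xs := lst) hmem
    rw [he] at h
    cases h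
    have hstep : pvWhileRemove lst val = pvWhileRemove (lst.erase val) val := by
      rw [pvWhileRemove.eq_def]
      split
      · next l'' heq =>
        rw [he] at heq
        cases heq
        rfl
      · next heq => rw [he] at heq; simp at heq
    rw [hstep, ih, filter_erase_val]
  | case2 lst h =>
    have hnm : val ∉ lst := (PySem.List.remove?_eq_none_iff lst val).1 h
    have hstep : pvWhileRemove lst val = lst := by
      rw [pvWhileRemove.eq_def]
      split
      · next l'' heq => rw [h] at heq; simp at heq
      · rfl
    rw [hstep]
    refine (List.filter_eq_self.2 ?_).symm
    intro x hx
    simp only [bne_iff_ne, ne_eq]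
    exact fun hxy => hnm (hxy ▸ hx)

-- loop invariant for A's fold: while the unprocessed suffix of the working list equals the
-- original one, the final left counter is left + (count of non-val elements in that suffix)
theorem loopA (val : Int) : ∀ (m k : Nat) (lst nums : List Int) (left : Nat),
    lst.length = nums.length → k + m = nums.length → left ≤ k → lst.drop k = nums.drop k →
    ((PySem.List.pyRange (k : Int) (nums.length : Int) 1).foldl (pvStepA val) (lst, (left : Int))).2
      = (left : Int) + ((nums.drop k).countP (fun x => x != val) : Int) := by
  intro m
  induction m with
  | zero =>
    intro k lst nums left hlen hk hle hdrop
    have hkn : k = nums.length := by omega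
    subst hkn
    rw [PySem.List.pyRange_one]
    simp
  | succ m ih =>
    intro k lst nums left hlen hk hle hdrop
    have hkl : k < nums.length := by omega
    have hkl' : k < lst.length := by omega
    have hklt : (k : Int) < (nums.length : Int) := by exact_mod_cast hkl
    rw [PySem.List.pyRange_one_cons hklt]
    -- the read nums[right] sees the untouched suffix: lst[k] = nums[k]
    have hget : PySem.List.pyGetD lst (k : Int) 0 = nums[k] := by
      rw [PySem.List.pyGetD_natCast, List.getD_eq_getElem lst 0 hkl']
      have h1 : lst[k] = (lst.drop k)[0]'(by simp [hkl']) := by simp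
      have h2 : nums[k] = (nums.drop k)[0]'(by simp [hkl]) := by simp
      rw [h1, h2]; congr 1
    have hcons : nums.drop k = nums[k] :: nums.drop (k + 1) := List.drop_eq_getElem_cons hkl
    have hdrop' : lst.drop (k + 1) = nums.drop (k + 1) := by
      have := congrArg List.tail hdrop
      simpa [List.tail_drop] using this
    simp only [List.foldl_cons]
    have hk1 : (k : Int) + 1 = ((k + 1 : Nat) : Int) := by push_cast; ring
    by_cases hv : nums[k] = val
    · -- element equals val: state unchanged
      have hstep : pvStepA val (lst, (left : Int)) (k : Int) = (lst, (left : Int)) := by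
        simp [pvStepA, hget, hv]
      rw [hstep, hk1, ih (k + 1) lst nums left hlen (by omega) (by omega) hdrop']
      rw [hcons]
      simp [hv]
    · -- element kept: write nums[k] at index left, increment left
      have hstep : pvStepA val (lst, (left : Int)) (k : Int)
          = (lst.set left nums[k], ((left + 1 : Nat) : Int)) := by
        simp only [pvStepA, hget]
        rw [if_pos hv]
        rw [PySem.List.pySetD_natCast]
        push_cast
        ring_nf
      have hdrop'' : (lst.set left nums[k]).drop (k + 1) = nums.drop (k + 1) := by
        rw [List.drop_set, if_pos (by omega : left < k + 1)]
        exact hdrop'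
      rw [hstep, hk1,
        ih (k + 1) (lst.set left nums[k]) nums (left + 1) (by simp [hlen]) (by omega) (by omega) hdrop'']
      rw [hcons]
      simp only [List.countP_cons]
      have hb : (nums[k] != val) = true := by simp [hv]
      rw [hb, if_pos rfl]
      push_cast
      ring

-- ===== VERDICT (by name: the statement is the Claim_ definition above) =====
theorem remove_element_pointer_two_pointers_spec : Claim_equal_remove_element_pointer_two_pointers := by
  intro nums val _
  show _ = _
  unfold remove_element_pointer_two_pointers remove_element_pointer_two_pointers_alt
  have h0 : ((PySem.List.pyRange ((0 : Nat) : Int) (nums.length : Int) 1).foldl (pvStepA val) (nums, ((0 : Nat) : Int))).2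
      = ((0 : Nat) : Int) + ((nums.drop 0).countP (fun x => x != val) : Int) :=
    loopA val nums.length 0 nums nums 0 rfl (by omega) (by omega) rfl
  simp only [Nat.cast_zero, List.drop_zero, zero_add] at h0
  rw [h0, whileRemove_eq_filter]
  rw [List.countP_eq_length_filter]
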